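-- pv_equiv track=rewrite | github.com/DerDennisOP/Sudoku | sudoku.py | solve_easy
-- ===== SOURCE A (Python) =====
-- def solve_easy(arr1, arr2, arr3):
--     comp = [1, 2, 3, 4, 5, 6, 7, 8, 9]
--     pos = []
--
--     for x in range(len(arr1)):
--         rem = True
--         if arr1[x] != 0 and arr1[x] in comp:
--             rem = False
--             comp.remove(arr1[x])
--         if arr2[x] != 0 and arr2[x] in comp:
--             rem = False
--             comp.remove(arr2[x])
--         if arr3[x] != 0 and arr3[x] in comp:
--             rem = False
--             comp.remove(arr3[x])
--         if rem:
--             pos.append(x)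
--     return (comp, pos)
-- ===== SOURCE B (Python) =====
-- def solve_easy(arr1, arr2, arr3):
--     first = {}
--     for x in range(len(arr1)):
--         for v in (arr1[x], arr2[x], arr3[x]):
--             if 1 <= v <= 9 and v not in first:
--                 first[v] = x
--     hits = set(first.values())
--     comp = [d for d in range(1, 10) if d not in first]
--     pos = [x for x in range(len(arr1)) if x not in hits]
--     return (comp, pos)
-- ===== Notes on version B (the rewrite author's own statement) =====
-- stated objective: alternative
-- what changed: Replaces the interleaved rem-flag/comp.remove mutation of the candidate list with a first-occurrence dictionary built in one pass, from which both the missing digits and the free positions are derived by two independent filter passes.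
import Mathlib
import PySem

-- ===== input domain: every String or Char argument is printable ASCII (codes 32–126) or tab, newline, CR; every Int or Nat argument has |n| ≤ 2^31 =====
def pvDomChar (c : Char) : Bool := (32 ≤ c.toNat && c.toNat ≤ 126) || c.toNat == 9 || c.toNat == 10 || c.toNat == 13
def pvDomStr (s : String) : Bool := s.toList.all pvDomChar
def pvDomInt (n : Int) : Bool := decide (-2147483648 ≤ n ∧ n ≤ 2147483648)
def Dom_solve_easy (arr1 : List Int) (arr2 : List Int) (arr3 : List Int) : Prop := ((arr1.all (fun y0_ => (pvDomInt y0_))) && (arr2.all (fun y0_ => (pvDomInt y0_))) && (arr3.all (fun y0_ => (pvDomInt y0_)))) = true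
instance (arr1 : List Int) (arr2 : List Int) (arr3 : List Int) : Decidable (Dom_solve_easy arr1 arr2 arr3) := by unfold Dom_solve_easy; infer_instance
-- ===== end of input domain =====

-- B replaces A's interleaved rem-flag / comp.remove mutation with a first-occurrence
-- dictionary built in one pass, then derives missing digits and free positions by two
-- independent filter passes (objective: alternative decomposition, similar cost).


-- ===== PORT A =====
-- Literal transliteration of A. Indices x ∈ range(len(arr1)) are always in range for
-- arr1; for arr2/arr3 Pre_ guarantees it, so pyGetD _ _ 0 is exact on Pre_.
def solve_easy (arr1 : List Int) (arr2 : List Int) (arr3 : List Int) : List Int × List Int :=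
  (PySem.List.pyRange 0 (arr1.length : Int) 1).foldl
    (fun st x =>
      let comp0 := st.1
      let v1 := PySem.List.pyGetD arr1 x 0
      let v2 := PySem.List.pyGetD arr2 x 0
      let v3 := PySem.List.pyGetD arr3 x 0
      let s1 := if v1 ≠ 0 ∧ v1 ∈ comp0 then (false, comp0.erase v1) else (true, comp0)
      let s2 := if v2 ≠ 0 ∧ v2 ∈ s1.2 then (false, s1.2.erase v2) else s1
      let s3 := if v3 ≠ 0 ∧ v3 ∈ s2.2 then (false, s2.2.erase v3) else s2
      (s3.2, if s3.1 then st.2 ++ [x] else st.2))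
    (([1, 2, 3, 4, 5, 6, 7, 8, 9] : List Int), ([] : List Int))

-- ===== PORT B =====
def solve_easy_alt (arr1 : List Int) (arr2 : List Int) (arr3 : List Int) : List Int × List Int :=
  let first : PySem.Dict Int Int :=
    (PySem.List.pyRange 0 (arr1.length : Int) 1).foldl
      (fun d x =>
        [PySem.List.pyGetD arr1 x 0, PySem.List.pyGetD arr2 x 0, PySem.List.pyGetD arr3 x 0].foldl
          (fun d v => if 1 ≤ v ∧ v ≤ 9 ∧ ¬ d.contains v then d.insert v x else d) d)
      PySem.Dict.empty
  let hits : PySem.Set Int := PySem.Set.ofList first.values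
  let comp := (PySem.List.pyRange 1 10 1).filter (fun dg => ! first.contains dg)
  let pos := (PySem.List.pyRange 0 (arr1.length : Int) 1).filter (fun x => ! PySem.Set.contains hits x)
  (comp, pos)

-- ===== PRECONDITION & SPEC =====
-- Pre_: A indexes arr2[x] and arr3[x] for every x < len(arr1); on shorter arr2/arr3
-- Python raises IndexError (B raises there too), so those inputs are excluded.
def Pre_solve_easy (arr1 : List Int) (arr2 : List Int) (arr3 : List Int) : Prop :=
  arr1.length ≤ arr2.length ∧ arr1.length ≤ arr3.length
instance (arr1 : List Int) (arr2 : List Int) (arr3 : List Int) : Decidable (Pre_solve_easy arr1 arr2 arr3) := by unfold Pre_solve_easy; infer_instance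
def pvWitness_solve_easy : List Int × List Int × List Int := ([1, 0, 3], [0, 2, 0], [0, 0, 3])

def Spec_solve_easy (arr1 : List Int) (arr2 : List Int) (arr3 : List Int) (out : List Int × List Int) : Prop := out = solve_easy_alt arr1 arr2 arr3
instance (arr1 : List Int) (arr2 : List Int) (arr3 : List Int) (out : List Int × List Int) : Decidable (Spec_solve_easy arr1 arr2 arr3 out) := by unfold Spec_solve_easy; infer_instance

-- ===== CLAIM (what is proved, stated in full; the proofs are below) =====
def Claim_equal_solve_easy : Prop := ∀ (arr1 : List Int) (arr2 : List Int) (arr3 : List Int), Dom_solve_easy arr1 arr2 arr3 → Pre_solve_easy arr1 arr2 arr3 → Spec_solve_easy arr1 arr2 arr3 (solve_easy arr1 arr2 arr3)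


-- ===== LEMMAS AND PROOFS =====

-- proof-only helpers: named forms of the two folds
def pvFA (p : Bool × List Int) (v : Int) : Bool × List Int :=
  if v ≠ 0 ∧ v ∈ p.2 then (false, p.2.erase v) else p

def pvFB (x : Int) (d : PySem.Dict Int Int) (v : Int) : PySem.Dict Int Int :=
  if 1 ≤ v ∧ v ≤ 9 ∧ ¬ d.contains v then d.insert v x else d

def pvRow (arr1 arr2 arr3 : List Int) (x : Int) : List Int :=
  [PySem.List.pyGetD arr1 x 0, PySem.List.pyGetD arr2 x 0, PySem.List.pyGetD arr3 x 0]

def pvRowFold (d : PySem.Dict Int Int) (x : Int) (vs : List Int) : PySem.Dict Int Int :=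
  vs.foldl (pvFB x) d

def pvComp (d : PySem.Dict Int Int) : List Int :=
  (PySem.List.pyRange 1 10 1).filter (fun g => ! d.contains g)

def pvDict (arr1 arr2 arr3 : List Int) (n : Int) : PySem.Dict Int Int :=
  (PySem.List.pyRange 0 n 1).foldl
    (fun d x => pvRowFold d x (pvRow arr1 arr2 arr3 x)) PySem.Dict.empty

def pvStA (arr1 arr2 arr3 : List Int) (n : Int) : List Int × List Int :=
  (PySem.List.pyRange 0 n 1).foldl
    (fun st x =>
      let r := (pvRow arr1 arr2 arr3 x).foldl pvFA (true, st.1)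
      (r.2, if r.1 then st.2 ++ [x] else st.2))
    (([1, 2, 3, 4, 5, 6, 7, 8, 9] : List Int), ([] : List Int))

lemma pv_portA_eq (arr1 arr2 arr3 : List Int) :
    solve_easy arr1 arr2 arr3 = pvStA arr1 arr2 arr3 (arr1.length : Int) := by
  rfl

lemma pv_portB_dict (arr1 arr2 arr3 : List Int) :
    solve_easy_alt arr1 arr2 arr3 =
      (pvComp (pvDict arr1 arr2 arr3 (arr1.length : Int)),
       (PySem.List.pyRange 0 (arr1.length : Int) 1).filter
         (fun x => ! PySem.Set.contains
            (PySem.Set.ofList (pvDict arr1 arr2 arr3 (arr1.length : Int)).values) x)) := by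
  rfl

lemma pv_mem_comp (d : PySem.Dict Int Int) (v : Int) :
    (v ≠ 0 ∧ v ∈ pvComp d) ↔ (1 ≤ v ∧ v ≤ 9 ∧ ¬ d.contains v) := by
  simp only [pvComp, List.mem_filter, PySem.List.mem_pyRange_one]
  cases hc : d.contains v <;> simp [hc] <;> omega

lemma pv_values_insert_fresh (d : PySem.Dict Int Int) (k v : Int) (h : ¬ d.contains k) :
    (d.insert k v).values = d.values ++ [v] := by
  simp [PySem.Dict.insert, PySem.Dict.values, h]

lemma pv_size_insert_fresh (d : PySem.Dict Int Int) (k v : Int) (h : ¬ d.contains k) :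
    PySem.Dict.size (d.insert k v) = PySem.Dict.size d + 1 := by
  simp [PySem.Dict.size_insert, h]

lemma pv_erase_comp (d : PySem.Dict Int Int) (v x : Int) (h : ¬ d.contains v) :
    (pvComp d).erase v = pvComp (d.insert v x) := by
  have hnd : (pvComp d).Nodup := (PySem.List.nodup_pyRange_one 1 10).filter _
  rw [List.Nodup.erase_eq_filter hnd, pvComp, pvComp, List.filter_filter]
  apply List.filter_congr
  intro g _
  rw [PySem.Dict.contains_insert]
  cases hg : (g == v) <;> cases hc : d.contains g
  all_goals try simp_all [bne]

lemma pvFB_pos (x : Int) (d : PySem.Dict Int Int) (v : Int)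
    (hc : 1 ≤ v ∧ v ≤ 9 ∧ ¬ d.contains v) : pvFB x d v = d.insert v x := by
  rw [pvFB, if_pos hc]

lemma pvFB_neg (x : Int) (d : PySem.Dict Int Int) (v : Int)
    (hc : ¬ (1 ≤ v ∧ v ≤ 9 ∧ ¬ d.contains v)) : pvFB x d v = d := by
  rw [pvFB, if_neg hc]

lemma pv_size_rowFold (d : PySem.Dict Int Int) (x : Int) (vs : List Int) :
    PySem.Dict.size d ≤ PySem.Dict.size (pvRowFold d x vs) := by
  induction vs generalizing d with
  | nil => simp [pvRowFold]
  | cons v vs ih =>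
    rw [pvRowFold, List.foldl_cons]
    by_cases hc : 1 ≤ v ∧ v ≤ 9 ∧ ¬ d.contains v
    · rw [pvFB_pos x d v hc]
      have h2 := ih (d.insert v x)
      rw [pvRowFold] at h2
      have h3 := pv_size_insert_fresh d v x hc.2.2
      omega
    · rw [pvFB_neg x d v hc]
      have h2 := ih d
      rw [pvRowFold] at h2
      exact h2

lemma pv_values_rowFold_mem (d : PySem.Dict Int Int) (x : Int) (vs : List Int) :
    ∀ w ∈ (pvRowFold d x vs).values, w = x ∨ w ∈ d.values := by
  induction vs generalizing d with
  | nil => intro w hw; right; simpa [pvRowFold] using hw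
  | cons v vs ih =>
    intro w hw
    rw [pvRowFold, List.foldl_cons] at hw
    by_cases hc : 1 ≤ v ∧ v ≤ 9 ∧ ¬ d.contains v
    · rw [pvFB_pos x d v hc] at hw
      rcases ih (d.insert v x) w hw with h | h
      · exact Or.inl h
      · rw [pv_values_insert_fresh d v x hc.2.2] at h
        rcases List.mem_append.mp h with h | h
        · exact Or.inr h
        · exact Or.inl (by simpa using h)
    · rw [pvFB_neg x d v hc] at hw
      exact ih d w hw

lemma pv_values_rowFold_mono (d : PySem.Dict Int Int) (x : Int) (vs : List Int) :
    ∀ w ∈ d.values, w ∈ (pvRowFold d x vs).values := by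
  induction vs generalizing d with
  | nil => intro w hw; simpa [pvRowFold] using hw
  | cons v vs ih =>
    intro w hw
    rw [pvRowFold, List.foldl_cons]
    by_cases hc : 1 ≤ v ∧ v ≤ 9 ∧ ¬ d.contains v
    · rw [pvFB_pos x d v hc]
      exact ih (d.insert v x) w
        (by rw [pv_values_insert_fresh d v x hc.2.2]; exact List.mem_append_left _ hw)
    · rw [pvFB_neg x d v hc]
      exact ih d w hw

lemma pv_x_mem_iff_size (d : PySem.Dict Int Int) (x : Int) (vs : List Int)
    (hx : x ∉ d.values) :
    (x ∈ (pvRowFold d x vs).values) ↔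
      PySem.Dict.size (pvRowFold d x vs) ≠ PySem.Dict.size d := by
  induction vs generalizing d with
  | nil => simp [pvRowFold, hx]
  | cons v vs ih =>
    rw [pvRowFold, List.foldl_cons]
    by_cases hc : 1 ≤ v ∧ v ≤ 9 ∧ ¬ d.contains v
    · rw [pvFB_pos x d v hc]
      have hxin : x ∈ (pvRowFold (d.insert v x) x vs).values := by
        apply pv_values_rowFold_mono
        rw [pv_values_insert_fresh d v x hc.2.2]
        exact List.mem_append_right _ (by simp)
      have hsz1 := pv_size_insert_fresh d v x hc.2.2
      have hsz2 := pv_size_rowFold (d.insert v x) x vs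
      rw [pvRowFold] at hxin hsz2
      constructor
      · intro _; omega
      · intro _; exact hxin
    · rw [pvFB_neg x d v hc]
      exact ih d hx

lemma pv_row_lemma (d : PySem.Dict Int Int) (x : Int) (vs : List Int) (flag : Bool) :
    vs.foldl pvFA (flag, pvComp d) =
      (flag && (PySem.Dict.size (pvRowFold d x vs) == PySem.Dict.size d),
       pvComp (pvRowFold d x vs)) := by
  induction vs generalizing d flag with
  | nil => simp [pvRowFold]
  | cons v vs ih =>
    rw [List.foldl_cons, pvRowFold, List.foldl_cons]
    by_cases hc : 1 ≤ v ∧ v ≤ 9 ∧ ¬ d.contains v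
    · have hca : v ≠ 0 ∧ v ∈ pvComp d := (pv_mem_comp d v).mpr hc
      rw [show pvFA (flag, pvComp d) v = (false, (pvComp d).erase v) from by
        rw [pvFA]; exact if_pos hca]
      rw [pv_erase_comp d v x hc.2.2]
      rw [pvFB_pos x d v hc]
      have h2 := ih (d.insert v x) false
      rw [pvRowFold] at h2
      rw [h2]
      have hsz1 := pv_size_insert_fresh d v x hc.2.2
      have hsz2 := pv_size_rowFold (d.insert v x) x vs
      rw [pvRowFold] at hsz2
      have hne : (PySem.Dict.size (vs.foldl (pvFB x) (d.insert v x)) ==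
          PySem.Dict.size d) = false := by
        simp only [beq_eq_false_iff_ne, ne_eq]
        omega
      simp [hne]
    · have hca : ¬ (v ≠ 0 ∧ v ∈ pvComp d) := fun h => hc ((pv_mem_comp d v).mp h)
      rw [show pvFA (flag, pvComp d) v = (flag, pvComp d) from by
        rw [pvFA]; exact if_neg hca]
      rw [pvFB_neg x d v hc]
      have h2 := ih d flag
      rw [pvRowFold] at h2
      exact h2

lemma pv_dict_succ (arr1 arr2 arr3 : List Int) (n : ℕ) :
    pvDict arr1 arr2 arr3 ((n : Int) + 1) =
      pvRowFold (pvDict arr1 arr2 arr3 (n : Int)) (n : Int)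
        (pvRow arr1 arr2 arr3 (n : Int)) := by
  rw [pvDict, pvDict,
    PySem.List.pyRange_one_succ_right (by positivity : (0:Int) ≤ (n:Int)),
    List.foldl_append]
  simp

lemma pv_values_lt (arr1 arr2 arr3 : List Int) (n : ℕ) :
    ∀ w ∈ (pvDict arr1 arr2 arr3 (n : Int)).values, 0 ≤ w ∧ w < (n : Int) := by
  induction n with
  | zero =>
    intro w hw
    simp [pvDict, PySem.List.pyRange_one_eq_nil, PySem.Dict.empty,
      PySem.Dict.values] at hw
  | succ n ih =>
    intro w hw
    have hcast : ((n + 1 : ℕ) : Int) = (n : Int) + 1 := by push_cast; ring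
    rw [hcast, pv_dict_succ arr1 arr2 arr3 n] at hw
    rcases pv_values_rowFold_mem _ _ _ w hw with h | h
    · subst h; constructor <;> omega
    · have := ih w h
      constructor <;> omega

lemma pv_invariant (arr1 arr2 arr3 : List Int) (n : ℕ) :
    pvStA arr1 arr2 arr3 (n : Int) =
      (pvComp (pvDict arr1 arr2 arr3 (n : Int)),
       (PySem.List.pyRange 0 (n : Int) 1).filter
         (fun x => ! decide (x ∈ (pvDict arr1 arr2 arr3 (n : Int)).values))) := by
  induction n with
  | zero =>
    rw [pvStA, pvDict]
    rw [show ((0:ℕ):Int) = 0 from rfl]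
    rw [PySem.List.pyRange_one_eq_nil le_rfl]
    simp only [List.foldl_nil, List.filter_nil]
    decide
  | succ n ih =>
    have hcast : ((n + 1 : ℕ) : Int) = (n : Int) + 1 := by push_cast; ring
    rw [hcast]
    have hdict := pv_dict_succ arr1 arr2 arr3 n
    have hstep : pvStA arr1 arr2 arr3 ((n : Int) + 1) =
        ((( (pvRow arr1 arr2 arr3 (n : Int)).foldl pvFA
            (true, (pvStA arr1 arr2 arr3 (n : Int)).1)).2),
         if ((pvRow arr1 arr2 arr3 (n : Int)).foldl pvFA
            (true, (pvStA arr1 arr2 arr3 (n : Int)).1)).1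
         then (pvStA arr1 arr2 arr3 (n : Int)).2 ++ [(n : Int)]
         else (pvStA arr1 arr2 arr3 (n : Int)).2) := by
      rw [pvStA, pvStA,
        PySem.List.pyRange_one_succ_right (by positivity : (0:Int) ≤ (n:Int)),
        List.foldl_append]
      simp
    rw [hstep, ih]
    have hrow := pv_row_lemma (pvDict arr1 arr2 arr3 (n : Int)) (n : Int)
      (pvRow arr1 arr2 arr3 (n : Int)) true
    simp only [hrow, Bool.true_and, hdict]
    have hnx : (n : Int) ∉ (pvDict arr1 arr2 arr3 (n : Int)).values := fun h => by
      have := pv_values_lt arr1 arr2 arr3 n _ h; omega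
    have hiff := pv_x_mem_iff_size (pvDict arr1 arr2 arr3 (n : Int)) (n : Int)
      (pvRow arr1 arr2 arr3 (n : Int)) hnx
    refine Prod.ext rfl ?_
    simp only
    rw [PySem.List.pyRange_one_succ_right (by positivity : (0:Int) ≤ (n:Int)),
      List.filter_append]
    have hcong : (PySem.List.pyRange 0 (n : Int) 1).filter
        (fun x => ! decide (x ∈ (pvRowFold (pvDict arr1 arr2 arr3 (n : Int)) (n : Int)
            (pvRow arr1 arr2 arr3 (n : Int))).values)) =
        (PySem.List.pyRange 0 (n : Int) 1).filter
          (fun x => ! decide (x ∈ (pvDict arr1 arr2 arr3 (n : Int)).values)) := by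
      apply List.filter_congr
      intro x hx
      have hxlt : x < (n : Int) := (PySem.List.mem_pyRange_one.mp hx).2
      have hmemiff : x ∈ (pvRowFold (pvDict arr1 arr2 arr3 (n : Int)) (n : Int)
          (pvRow arr1 arr2 arr3 (n : Int))).values ↔
          x ∈ (pvDict arr1 arr2 arr3 (n : Int)).values := by
        constructor
        · intro h
          rcases pv_values_rowFold_mem _ _ _ x h with h1 | h1
          · omega
          · exact h1
        · intro h
          exact pv_values_rowFold_mono _ _ _ x h
      simp [hmemiff]
    rw [hcong]
    by_cases hsz : PySem.Dict.size (pvRowFold (pvDict arr1 arr2 arr3 (n : Int)) (n : Int)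
        (pvRow arr1 arr2 arr3 (n : Int))) = PySem.Dict.size (pvDict arr1 arr2 arr3 (n : Int))
    · have hmem : (n : Int) ∉ (pvRowFold (pvDict arr1 arr2 arr3 (n : Int)) (n : Int)
          (pvRow arr1 arr2 arr3 (n : Int))).values := fun h => (hiff.mp h) hsz
      rw [if_pos (by simp [hsz])]
      rw [List.filter_cons, List.filter_nil]
      simp [hmem]
    · have hmem : (n : Int) ∈ (pvRowFold (pvDict arr1 arr2 arr3 (n : Int)) (n : Int)
          (pvRow arr1 arr2 arr3 (n : Int))).values := hiff.mpr hsz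
      rw [if_neg (by simp [hsz])]
      rw [List.filter_cons, List.filter_nil]
      simp [hmem]

-- ===== VERDICT (by name: the statement is the Claim_ definition above) =====
theorem solve_easy_spec : Claim_equal_solve_easy := by
  intro arr1 arr2 arr3 _ _
  unfold Spec_solve_easy
  rw [pv_portA_eq, pv_portB_dict, pv_invariant arr1 arr2 arr3 arr1.length]
  refine Prod.ext rfl ?_
  simp only
  apply List.filter_congr
  intro x _
  simp [PySem.Set.contains, PySem.Set.mem_ofList]
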